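-- pv_equiv track=rewrite | github.com/Tzvi23/Hierarchical-Summarization-Part1 | utils/util_functions.py | remove_bad_sentences
-- ===== SOURCE A (Python) =====
-- def remove_bad_sentences(processed_text):
--     index_for_del = list()
--     for index in range(len(processed_text)):
--         if processed_text[index].endswith('</S>') and not processed_text[index].startswith('<S>'):
--             index_for_del.append(index)
--     if not index_for_del:
--         return processed_text
--     for index in sorted(index_for_del, reverse=True):  # Delete all the indexes that now empty in reverse
--         del processed_text[index]
--     return remove_bad_sentences(processed_text)
-- ===== SOURCE B (Python) =====
-- def remove_bad_sentences(processed_text):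
--     processed_text[:] = [s for s in processed_text
--                          if not (s.endswith('</S>') and not s.startswith('<S>'))]
--     return processed_text
-- ===== Notes on version B (the rewrite author's own statement) =====
-- stated objective: simpler
-- what changed: The index-collection loop, reverse-order deletion loop and recursive re-scan are replaced by a single in-place filter pass (slice assignment keeps the caller-visible mutation).
import Mathlib
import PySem

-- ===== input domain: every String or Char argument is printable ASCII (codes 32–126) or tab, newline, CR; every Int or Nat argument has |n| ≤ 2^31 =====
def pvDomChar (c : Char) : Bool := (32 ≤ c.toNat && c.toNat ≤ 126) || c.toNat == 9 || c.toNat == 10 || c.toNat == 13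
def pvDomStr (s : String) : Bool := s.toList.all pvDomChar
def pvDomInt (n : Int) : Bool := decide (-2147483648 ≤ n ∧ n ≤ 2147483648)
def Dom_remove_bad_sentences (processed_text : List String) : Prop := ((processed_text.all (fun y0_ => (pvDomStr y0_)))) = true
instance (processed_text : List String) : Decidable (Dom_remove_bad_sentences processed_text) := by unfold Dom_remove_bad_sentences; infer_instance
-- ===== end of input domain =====

-- B replaces A's index-collection loop, reverse-deletion loop and recursive re-scan by a single
-- filter pass (simpler). Both A and B mutate the argument list in place in Python; the theorems
-- below are about the RETURN value (which both also return, and which equals the mutated list).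

-- ===== PORT A =====
-- A's "bad sentence" test, named for use in the termination/equivalence lemmas.
def pvBad (s : String) : Bool :=
  PySem.Str.endswith s "</S>" && !PySem.Str.startswith s "<S>"

-- Lemmas the port needs for termination (cited in decreasing_by).
-- foldl that conditionally appends = filter (A's index-collection loop).
theorem pvFoldlAppend (p : Nat → Bool) (l : List Nat) (acc : List Nat) :
    l.foldl (fun a i => if p i then a ++ [i] else a) acc = acc ++ l.filter p := by
  induction l generalizing acc with
  | nil => simp
  | cons x t ih =>
    by_cases h : p x <;> simp [List.foldl_cons, h, ih]

-- A's bad-index list, as a filter of the index range.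
theorem pvBadIdxEq (xs : List String) :
    (List.range xs.length).foldl
      (fun acc index =>
        if PySem.Str.endswith (xs.getD index "") "</S>" &&
           !PySem.Str.startswith (xs.getD index "") "<S>"
        then acc ++ [index] else acc) []
    = (List.range xs.length).filter (fun i => pvBad (xs.getD i "")) := by
  simpa [pvBad] using
    pvFoldlAppend (fun i => pvBad (xs.getD i "")) (List.range xs.length) []

-- sorted(…, reverse=True) of the (strictly increasing) bad-index list is its reverse.
theorem pvSortedRev (xs : List String) :
    PySem.List.sorted ((List.range xs.length).filter (fun i => pvBad (xs.getD i ""))) (fun i => i) true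
    = ((List.range xs.length).filter (fun i => pvBad (xs.getD i ""))).reverse := by
  apply PySem.List.sorted_rev_eq_of_perm_of_pairwise_gt
  · exact List.reverse_perm _
  · rw [List.pairwise_reverse]
    exact (List.pairwise_lt_range).filter _

-- deleting indices shifted by one in a cons leaves the head untouched
theorem pvEraseMapSucc (is : List Nat) (x : String) (t : List String) :
    (is.map Nat.succ).foldl (fun l i => l.eraseIdx i) (x :: t)
    = x :: is.foldl (fun l i => l.eraseIdx i) t := by
  induction is generalizing t with
  | nil => rfl
  | cons i js ih => simp [List.foldl_cons, List.eraseIdx_cons_succ, ih]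

-- CORE: deleting the bad indices back-to-front yields the filtered list.
theorem pvDeleteEqFilter (p : String → Bool) (xs : List String) :
    ((List.range xs.length).filter (fun i => p (xs.getD i ""))).reverse.foldl
      (fun l i => l.eraseIdx i) xs
    = xs.filter (fun s => !p s) := by
  induction xs with
  | nil => rfl
  | cons x t ih =>
    have hrange : List.range (x :: t).length = 0 :: (List.range t.length).map Nat.succ := by
      simpa using List.range_succ_eq_map
    have hmapfilter :
        ((List.range t.length).map Nat.succ).filter (fun i => p ((x :: t).getD i ""))
        = ((List.range t.length).filter (fun i => p (t.getD i ""))).map Nat.succ := by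
      rw [List.filter_map]; rfl
    by_cases hx : p x
    · rw [hrange]
      simp only [List.filter_cons, List.getD_cons_zero, hx, if_pos, hmapfilter,
        List.reverse_cons, ← List.map_reverse, List.foldl_append, pvEraseMapSucc, ih]
      simp
    · rw [hrange, List.filter_cons]
      simp only [List.getD_cons_zero]
      rw [if_neg (by simpa using hx), hmapfilter, ← List.map_reverse,
        pvEraseMapSucc, ih, List.filter_cons]
      simp [hx]

-- nonempty bad-index list → some element of xs is bad
theorem pvExistsBad (xs : List String)
    (h : (List.range xs.length).filter (fun i => pvBad (xs.getD i "")) ≠ []) :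
    ∃ s ∈ xs, pvBad s := by
  obtain ⟨i, hi, hbad⟩ := by
    simpa [List.filter_eq_nil_iff] using h
  have hlt : i < xs.length := by simpa using hi
  exact ⟨xs.getD i "", by rw [List.getD_eq_getElem _ _ hlt]; exact xs.getElem_mem hlt, hbad⟩

-- the one-pass deletion strictly shrinks the list when a bad index exists
theorem pvDelShrinks (xs : List String)
    (h : (List.range xs.length).foldl
      (fun acc index =>
        if PySem.Str.endswith (xs.getD index "") "</S>" &&
           !PySem.Str.startswith (xs.getD index "") "<S>"
        then acc ++ [index] else acc) [] ≠ []) :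
    ((PySem.List.sorted
        ((List.range xs.length).foldl
          (fun acc index =>
            if PySem.Str.endswith (xs.getD index "") "</S>" &&
               !PySem.Str.startswith (xs.getD index "") "<S>"
            then acc ++ [index] else acc) [])
        (fun i => i) true).foldl (fun l i => l.eraseIdx i) xs).length < xs.length := by
  rw [pvBadIdxEq] at h ⊢
  rw [pvSortedRev, pvDeleteEqFilter]
  rw [List.length_filter_lt_length_iff_exists]
  obtain ⟨s, hs, hb⟩ := pvExistsBad xs h
  exact ⟨s, hs, by simp [hb]⟩

-- Port of A: collect bad indices over range(len), return the list unchanged if none,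
-- otherwise delete them in reverse-sorted order and recurse.
-- (Indices come from range(len) and are deleted largest-first, so each `del` index is a
-- valid nonnegative index; Nat indexing with getD/eraseIdx is exact there.)
def remove_bad_sentences (processed_text : List String) : List String :=
  let index_for_del :=
    (List.range processed_text.length).foldl
      (fun acc index =>
        if PySem.Str.endswith (processed_text.getD index "") "</S>" &&
           !PySem.Str.startswith (processed_text.getD index "") "<S>"
        then acc ++ [index] else acc) []
  if h : index_for_del = [] then
    processed_text
  else
    remove_bad_sentences
      ((PySem.List.sorted index_for_del (fun i => i) true).foldl
        (fun l i => l.eraseIdx i) processed_text)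
termination_by processed_text.length
decreasing_by exact pvDelShrinks processed_text h

-- ===== PORT B =====
-- Port of B: one filter pass keeping the sentences that are not bad.
def remove_bad_sentences_alt (processed_text : List String) : List String :=
  processed_text.filter
    (fun s => !(PySem.Str.endswith s "</S>" && !PySem.Str.startswith s "<S>"))

-- ===== PRECONDITION & SPEC =====
def Spec_remove_bad_sentences (processed_text : List String) (out : List String) : Prop := out = remove_bad_sentences_alt processed_text
instance (processed_text : List String) (out : List String) : Decidable (Spec_remove_bad_sentences processed_text out) := by unfold Spec_remove_bad_sentences; infer_instance

-- ===== CLAIM (what is proved, stated in full; the proofs are below) =====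
def Claim_equal_remove_bad_sentences : Prop := ∀ (processed_text : List String), Dom_remove_bad_sentences processed_text → Spec_remove_bad_sentences processed_text (remove_bad_sentences processed_text)

-- ===== LEMMAS AND PROOFS =====

-- if no index is bad, every element passes the filter
theorem pvFilterEqSelf (xs : List String)
    (h : (List.range xs.length).filter (fun i => pvBad (xs.getD i "")) = []) :
    xs.filter (fun s => !pvBad s) = xs := by
  rw [List.filter_eq_self]
  intro s hs
  obtain ⟨i, hlt, rfl⟩ := List.mem_iff_getElem.mp hs
  have := (List.filter_eq_nil_iff.mp h) i (List.mem_range.mpr hlt)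
  rw [List.getD_eq_getElem _ _ hlt] at this
  simpa using this

-- A computes the filtered list
theorem pvA_eq_filter (xs : List String) :
    remove_bad_sentences xs = xs.filter (fun s => !pvBad s) := by
  rw [remove_bad_sentences]
  by_cases h : (List.range xs.length).foldl
      (fun acc index =>
        if PySem.Str.endswith (xs.getD index "") "</S>" &&
           !PySem.Str.startswith (xs.getD index "") "<S>"
        then acc ++ [index] else acc) [] = []
  · rw [dif_pos h]
    rw [pvBadIdxEq] at h
    exact (pvFilterEqSelf xs h).symm
  · rw [dif_neg h]
    rw [pvBadIdxEq, pvSortedRev, pvDeleteEqFilter]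
    rw [pvA_eq_filter (xs.filter (fun s => !pvBad s))]
    rw [List.filter_filter]
    simp
termination_by xs.length
decreasing_by
  have := pvDelShrinks xs h
  rwa [pvBadIdxEq, pvSortedRev, pvDeleteEqFilter] at this

-- ===== VERDICT (by name: the statement is the Claim_ definition above) =====
theorem remove_bad_sentences_spec : Claim_equal_remove_bad_sentences := by
  intro xs _
  show remove_bad_sentences xs = remove_bad_sentences_alt xs
  exact pvA_eq_filter xs
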